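-- pv_equiv track=rewrite | github.com/sebguevara/tesis | tesis-crawler/app/core/rag_service.py | _contexts_look_like_program_catalog
-- ===== SOURCE A (Python) =====
-- def _contexts_look_like_program_catalog(contexts: list[str]) -> bool:
--     if not contexts:
--         return False
--     joined = "\n".join(contexts).lower()
--     url_hits = 0
--     for block in contexts:
--         head = (block.splitlines()[0] if block else "").lower()
--         if any(
--             token in head
--             for token in (
--                 "/carreras",
--                 "/oferta-academica",
--                 "/ofertas-academicas",
--                 "/programas",
--                 "/carrera-",
--             )
--         ):
--             url_hits += 1
--     keyword_hits = sum(
--         1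
--         for kw in ("oferta académica", "oferta academica", "carreras", "programas")
--         if kw in joined
--     )
--     return url_hits >= 1 or keyword_hits >= 2
-- ===== SOURCE B (Python) =====
-- URL_TOKENS = ("/carreras", "/oferta-academica", "/ofertas-academicas", "/programas", "/carrera-")
-- KEYWORDS = ("oferta académica", "oferta academica", "carreras", "programas")
--
--
-- def _contexts_look_like_program_catalog(contexts: list[str]) -> bool:
--     url_found = False
--     seen_keywords = set()
--     for block in contexts:
--         head = (block.splitlines()[0] if block else "").lower()
--         if not url_found and any(token in head for token in URL_TOKENS):
--             url_found = True
--         low = block.lower()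
--         for kw in KEYWORDS:
--             if kw in low:
--                 seen_keywords.add(kw)
--     return url_found or len(seen_keywords) >= 2
-- ===== Notes on version B (the rewrite author's own statement) =====
-- stated objective: alternative
-- what changed: B drops the joined '\n'-concatenation and its separate keyword-count pass: one loop over the blocks maintains a short-circuited URL flag and a set of distinct keywords seen in any lowercased block, returning flag or len(set) >= 2 (correct because the keywords contain no newline, so membership in the join equals membership in some block).
import Mathlib
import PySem

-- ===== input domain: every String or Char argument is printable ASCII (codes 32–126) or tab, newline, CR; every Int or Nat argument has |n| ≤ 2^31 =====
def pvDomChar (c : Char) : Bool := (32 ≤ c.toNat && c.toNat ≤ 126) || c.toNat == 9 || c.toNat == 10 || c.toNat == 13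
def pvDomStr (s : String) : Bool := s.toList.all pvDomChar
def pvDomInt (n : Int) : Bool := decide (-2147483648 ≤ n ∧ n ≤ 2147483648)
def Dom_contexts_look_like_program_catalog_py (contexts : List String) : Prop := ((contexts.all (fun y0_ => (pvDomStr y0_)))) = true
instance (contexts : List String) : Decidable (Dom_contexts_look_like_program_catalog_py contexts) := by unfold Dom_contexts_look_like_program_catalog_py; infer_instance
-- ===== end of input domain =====

-- B replaces A's joined-string keyword scan and URL counter by one pass over the blocks
-- keeping a short-circuited flag and a set of distinct keywords (objective: alternative decomposition).

-- ===== PORT A =====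
def pvUrlTokens : List String :=
  ["/carreras", "/oferta-academica", "/ofertas-academicas", "/programas", "/carrera-"]

def pvKeywords : List String :=
  ["oferta académica", "oferta academica", "carreras", "programas"]

-- (block.splitlines()[0] if block else "").lower(); the truthiness guard makes the [0] index total
def pvHead (block : String) : String :=
  PySem.Str.lower (if block.toList = [] then "" else (PySem.Str.splitlines block).headD "")

def contexts_look_like_program_catalog_py (contexts : List String) : Bool :=
  if contexts = [] then false
  else
    let joined := PySem.Str.lower (PySem.Str.join "\n" contexts)
    let urlHits : Int := contexts.foldl (fun acc block =>
      if pvUrlTokens.any (fun token => PySem.Str.isIn token (pvHead block)) then acc + 1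
      else acc) 0
    let keywordHits : Int :=
      (pvKeywords.map (fun kw => if PySem.Str.isIn kw joined then (1 : Int) else 0)).sum
    decide (1 ≤ urlHits) || decide (2 ≤ keywordHits)

-- ===== PORT B =====
def contexts_look_like_program_catalog_py_alt (contexts : List String) : Bool :=
  let st := contexts.foldl (fun (st : Bool × PySem.Set String) block =>
    let urlFound :=
      if !st.1 && pvUrlTokens.any (fun token => PySem.Str.isIn token (pvHead block)) then true
      else st.1
    let low := PySem.Str.lower block
    let seen := pvKeywords.foldl (fun s kw => if PySem.Str.isIn kw low then s.add kw else s) st.2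
    (urlFound, seen)) (false, PySem.Set.empty)
  st.1 || decide (2 ≤ PySem.Set.len st.2)

-- ===== PRECONDITION & SPEC =====
def Spec_contexts_look_like_program_catalog_py (contexts : List String) (out : Bool) : Prop := out = contexts_look_like_program_catalog_py_alt contexts
instance (contexts : List String) (out : Bool) : Decidable (Spec_contexts_look_like_program_catalog_py contexts out) := by unfold Spec_contexts_look_like_program_catalog_py; infer_instance

-- ===== CLAIM (what is proved, stated in full; the proofs are below) =====
def Claim_equal_contexts_look_like_program_catalog_py : Prop := ∀ (contexts : List String), Dom_contexts_look_like_program_catalog_py contexts → Spec_contexts_look_like_program_catalog_py contexts (contexts_look_like_program_catalog_py contexts)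

-- ===== LEMMAS AND PROOFS =====

-- an infix not containing c lies entirely left or entirely right of a c separator
theorem pv_infix_append_cons_iff {c : Char} {sub a b : List Char} (hc : c ∉ sub) :
    sub <:+: a ++ c :: b ↔ sub <:+: a ∨ sub <:+: b := by
  constructor
  · rintro ⟨u, v, huv⟩
    by_cases h1 : u.length + sub.length ≤ a.length
    · left
      have hpre : u ++ sub <+: a := by
        apply List.prefix_of_prefix_length_le (l₃ := a ++ c :: b)
        · rw [← huv]; simp [List.append_assoc]
        · exact List.prefix_append a (c :: b)
        · simpa using h1
      exact (List.IsSuffix.isInfix (List.suffix_append u sub)).trans hpre.isInfix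
    · by_cases h2 : a.length + 1 ≤ u.length
      · right
        have hsuf : sub ++ v <:+ b := by
          have hl : (u ++ (sub ++ v)).length = (a ++ c :: b).length := by rw [← huv]; simp
          apply List.suffix_of_suffix_length_le (l₃ := a ++ c :: b)
          · rw [← huv]; simp
          · simpa using List.suffix_append (a ++ [c]) b
          · simp only [List.length_append, List.length_cons] at hl ⊢; omega
        exact (List.IsPrefix.isInfix (List.prefix_append sub v)).trans hsuf.isInfix
      · exfalso
        have hl : (u ++ (sub ++ v)).length = (a ++ c :: b).length := by rw [← huv]; simp
        simp at hl
        have hu : u.length ≤ a.length := by omega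
        have hsb : a.length - u.length < sub.length := by omega
        have e1 : (a ++ c :: b)[a.length]'(by simp) = c := by
          rw [List.getElem_append_right (le_refl a.length)]
          simp
        have e2 : (u ++ (sub ++ v))[a.length]'(by simp; omega)
            = sub[a.length - u.length]'hsb := by
          rw [List.getElem_append_right hu]
          exact List.getElem_append_left hsb
        apply hc
        have huv' : u ++ (sub ++ v) = a ++ c :: b := by rw [← List.append_assoc]; exact huv
        rw [← e2.symm.trans ((List.getElem_of_eq huv'.symm _).symm.trans e1)]
        exact List.getElem_mem _
  · rintro (h | h)
    · exact h.trans (List.IsPrefix.isInfix (List.prefix_append a (c :: b)))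
    · exact h.trans (List.IsSuffix.isInfix (by simpa using List.suffix_append (a ++ [c]) b))

theorem pv_intercalate_cons_cons (c : Char) (l l2 : List Char) (rest : List (List Char)) :
    List.intercalate [c] (l :: l2 :: rest) = l ++ c :: List.intercalate [c] (l2 :: rest) := by
  simp [List.intercalate, List.intersperse]

theorem pv_infix_intercalate_iff {c : Char} {sub : List Char} (hc : c ∉ sub) (hne : sub ≠ [])
    (ls : List (List Char)) : sub <:+: List.intercalate [c] ls ↔ ∃ l ∈ ls, sub <:+: l := by
  induction ls with
  | nil => simp [List.intercalate, hne]
  | cons l rest ih =>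
    cases rest with
    | nil => simp [List.intercalate]
    | cons l2 rest2 =>
      rw [pv_intercalate_cons_cons, pv_infix_append_cons_iff hc, ih]
      simp

theorem pv_lower_intercalate (ls : List (List Char)) :
    PySem.Chars.lower (List.intercalate ['\n'] ls)
      = List.intercalate ['\n'] (ls.map PySem.Chars.lower) := by
  induction ls with
  | nil => simp [PySem.Chars.lower, List.intercalate]
  | cons l rest ih =>
    cases rest with
    | nil => simp [List.intercalate]
    | cons l2 rest2 =>
      have hmap : (l :: l2 :: rest2).map PySem.Chars.lower
          = PySem.Chars.lower l :: PySem.Chars.lower l2 :: rest2.map PySem.Chars.lower := rfl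
      have hmap2 : PySem.Chars.lower l2 :: rest2.map PySem.Chars.lower
          = (l2 :: rest2).map PySem.Chars.lower := rfl
      rw [pv_intercalate_cons_cons, hmap, pv_intercalate_cons_cons, hmap2, ← ih]
      simp only [PySem.Chars.lower, List.map_append, List.map_cons]
      have hn : PySem.Chars.lowerChar '\n' = '\n' := rfl
      rw [hn]

-- kw occurs in the lowercased newline-join iff it occurs in some lowercased block
theorem pv_kw_in_joined (kw : String) (hc : '\n' ∉ kw.toList) (hne : kw.toList ≠ [])
    (contexts : List String) :
    PySem.Str.isIn kw (PySem.Str.lower (PySem.Str.join "\n" contexts))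
      = contexts.any (fun b => PySem.Str.isIn kw (PySem.Str.lower b)) := by
  rw [Bool.eq_iff_iff]
  rw [PySem.Str.isIn_iff_infix, List.any_eq_true]
  rw [PySem.Str.toList_lower, PySem.Str.toList_join]
  have hsep : ("\n" : String).toList = ['\n'] := by decide
  rw [hsep, PySem.Chars.join, pv_lower_intercalate, pv_infix_intercalate_iff hc hne]
  constructor
  · rintro ⟨l, hl, hinf⟩
    rw [List.map_map, List.mem_map] at hl
    obtain ⟨b, hb, rfl⟩ := hl
    refine ⟨b, hb, (PySem.Str.isIn_iff_infix _ _).mpr ?_⟩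
    rw [PySem.Str.toList_lower]
    exact hinf
  · rintro ⟨b, hb, hin⟩
    refine ⟨PySem.Chars.lower b.toList, ?_, ?_⟩
    · rw [List.map_map, List.mem_map]
      exact ⟨b, hb, rfl⟩
    · have h := (PySem.Str.isIn_iff_infix _ _).mp hin
      rwa [PySem.Str.toList_lower] at h

-- B's short-circuited flag fold computes init || any
theorem pv_flag_fold (p : String → Bool) (l : List String) (b0 : Bool) :
    l.foldl (fun b block => if !b && p block then true else b) b0 = (b0 || l.any p) := by
  induction l generalizing b0 with
  | nil => simp
  | cons x xs ih =>
    rw [List.foldl_cons, ih]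
    cases b0 <;> cases h : p x <;> simp [h]

-- membership in the inner keyword-set fold
theorem pv_inner_mem (q : String → Bool) (l : List String) (s : PySem.Set String) (x : String) :
    x ∈ l.foldl (fun s kw => if q kw then s.add kw else s) s ↔ x ∈ s ∨ (x ∈ l ∧ q x = true) := by
  induction l generalizing s with
  | nil => simp
  | cons kw rest ih =>
    rw [List.foldl_cons, ih]
    by_cases h : q kw = true
    · rw [if_pos h, PySem.Set.mem_add]
      constructor
      · rintro ((h1 | rfl) | h1)
        · exact Or.inl h1
        · exact Or.inr ⟨List.mem_cons_self .., h⟩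
        · exact Or.inr ⟨List.mem_cons_of_mem _ h1.1, h1.2⟩
      · rintro (h1 | ⟨h1, h2⟩)
        · exact Or.inl (Or.inl h1)
        · rcases List.mem_cons.mp h1 with rfl | h1
          · exact Or.inl (Or.inr rfl)
          · exact Or.inr ⟨h1, h2⟩
    · rw [if_neg h]
      rw [Bool.not_eq_true] at h
      constructor
      · rintro (h1 | h1)
        · exact Or.inl h1
        · exact Or.inr ⟨List.mem_cons_of_mem _ h1.1, h1.2⟩
      · rintro (h1 | ⟨h1, h2⟩)
        · exact Or.inl h1
        · rcases List.mem_cons.mp h1 with rfl | h1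
          · rw [h] at h2; cases h2
          · exact Or.inr ⟨h1, h2⟩

theorem pv_inner_nodup (q : String → Bool) (l : List String) (s : PySem.Set String)
    (hs : s.Nodup) : (l.foldl (fun s kw => if q kw then s.add kw else s) s).Nodup := by
  induction l generalizing s with
  | nil => exact hs
  | cons kw rest ih =>
    rw [List.foldl_cons]
    split
    · exact ih _ (PySem.Set.nodup_add s kw hs)
    · exact ih _ hs

-- membership and nodup in the outer block fold
theorem pv_outer_mem (contexts : List String) (s : PySem.Set String) (x : String) :
    x ∈ contexts.foldl (fun s block =>
        pvKeywords.foldl (fun s kw => if PySem.Str.isIn kw (PySem.Str.lower block) then s.add kw else s) s) s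
      ↔ x ∈ s ∨ (x ∈ pvKeywords ∧ contexts.any (fun b => PySem.Str.isIn x (PySem.Str.lower b)) = true) := by
  induction contexts generalizing s with
  | nil => simp
  | cons b rest ih =>
    rw [List.foldl_cons, ih, pv_inner_mem]
    simp only [List.any_cons, Bool.or_eq_true]
    tauto

theorem pv_outer_nodup (contexts : List String) (s : PySem.Set String) (hs : s.Nodup) :
    (contexts.foldl (fun s block =>
        pvKeywords.foldl (fun s kw => if PySem.Str.isIn kw (PySem.Str.lower block) then s.add kw else s) s) s).Nodup := by
  induction contexts generalizing s with
  | nil => exact hs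
  | cons b rest ih => exact ih _ (pv_inner_nodup _ _ _ hs)

-- B's seen-keyword set has the same size as A's distinct-keyword count
theorem pv_set_len (contexts : List String) :
    (contexts.foldl (fun s block =>
        pvKeywords.foldl (fun s kw => if PySem.Str.isIn kw (PySem.Str.lower block) then s.add kw else s) s)
        (PySem.Set.empty : PySem.Set String)).length
      = pvKeywords.countP (fun kw => contexts.any (fun b => PySem.Str.isIn kw (PySem.Str.lower b))) := by
  rw [List.countP_eq_length_filter]
  apply List.Perm.length_eq
  refine (List.perm_ext_iff_of_nodup
      (pv_outer_nodup contexts _ List.nodup_nil)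
      (List.Nodup.filter _ (by decide : pvKeywords.Nodup))).mpr ?_
  intro x
  rw [pv_outer_mem, List.mem_filter]
  simp

-- B's pair fold splits into the flag fold and the set fold
theorem pv_pair_fold (contexts : List String) (b0 : Bool) (s0 : PySem.Set String) :
    contexts.foldl (fun (st : Bool × PySem.Set String) block =>
        (if !st.1 && pvUrlTokens.any (fun token => PySem.Str.isIn token (pvHead block)) then true else st.1,
         pvKeywords.foldl (fun s kw => if PySem.Str.isIn kw (PySem.Str.lower block) then s.add kw else s) st.2))
        (b0, s0)
      = (contexts.foldl (fun b block =>
            if !b && pvUrlTokens.any (fun token => PySem.Str.isIn token (pvHead block)) then true else b) b0,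
         contexts.foldl (fun s block =>
            pvKeywords.foldl (fun s kw => if PySem.Str.isIn kw (PySem.Str.lower block) then s.add kw else s) s) s0) := by
  induction contexts generalizing b0 s0 with
  | nil => rfl
  | cons b rest ih => exact ih _ _

-- ===== VERDICT (by name: the statement is the Claim_ definition above) =====
set_option maxHeartbeats 1000000 in
theorem contexts_look_like_program_catalog_py_spec : Claim_equal_contexts_look_like_program_catalog_py := by
  intro contexts _
  unfold Spec_contexts_look_like_program_catalog_py
  unfold contexts_look_like_program_catalog_py contexts_look_like_program_catalog_py_alt
  cases contexts with
  | nil => decide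
  | cons c0 rest =>
    simp only [if_neg (List.cons_ne_nil c0 rest)]
    rw [pv_pair_fold]
    rw [pv_flag_fold]
    rw [PySem.List.foldl_count_if
      (fun block => pvUrlTokens.any (fun token => PySem.Str.isIn token (pvHead block))) (c0 :: rest) 0]
    have hcnt : List.countP (fun kw =>
          PySem.Str.isIn kw (PySem.Str.lower (PySem.Str.join "\n" (c0 :: rest)))) pvKeywords
        = List.countP (fun kw =>
            (c0 :: rest).any fun b => PySem.Str.isIn kw (PySem.Str.lower b)) pvKeywords := by
      apply List.countP_congr
      intro kw hkwm
      have h1 : '\n' ∉ kw.toList := by fin_cases hkwm <;> decide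
      have h2 : kw.toList ≠ [] := by fin_cases hkwm <;> decide
      rw [pv_kw_in_joined kw h1 h2]
    rw [PySem.List.sum_map_ite_one_zero, hcnt, ← pv_set_len]
    have hurl : decide (1 ≤ (0 : Int) + ((c0 :: rest).countP
          (fun block => pvUrlTokens.any (fun token => PySem.Str.isIn token (pvHead block))) : Int))
        = (false || (c0 :: rest).any (fun block => pvUrlTokens.any (fun token => PySem.Str.isIn token (pvHead block)))) := by
      rw [Bool.eq_iff_iff, Bool.false_or, decide_eq_true_eq, List.any_eq_true, ← List.countP_pos_iff]
      omega
    rw [hurl]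
    rfl
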